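-- pv_equiv track=rewrite | github.com/andoniuriasaiz/App_Osakidetza_Admin | analisis/pipeline/scraper_kaixo.py | _clean_answer
-- ===== SOURCE A (Python) =====
-- def _clean_answer(raw: str) -> str:
--     """Normaliza respuestas multi-letra (p.ej. 'DB' → 'B')."""
--     if not raw:
--         return "?"
--     raw = raw.strip().upper()
--     # Tomar el último carácter válido (los multi-letra son artefactos del scraper manual)
--     for ch in reversed(raw):
--         if ch in "ABCDE":
--             return ch
--     return "?"
-- ===== SOURCE B (Python) =====
-- def _clean_answer(raw: str) -> str:
--     """Normaliza respuestas multi-letra (p.ej. 'DB' → 'B')."""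
--     if not raw:
--         return "?"
--     valid = [c for c in raw.strip().upper() if c in "ABCDE"]
--     return valid[-1] if valid else "?"
-- ===== Notes on version B (the rewrite author's own statement) =====
-- stated objective: simpler
-- what changed: Replaced the reverse early-exit character scan with a single forward pass that collects all valid letters and indexes the last one.
import Mathlib
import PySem

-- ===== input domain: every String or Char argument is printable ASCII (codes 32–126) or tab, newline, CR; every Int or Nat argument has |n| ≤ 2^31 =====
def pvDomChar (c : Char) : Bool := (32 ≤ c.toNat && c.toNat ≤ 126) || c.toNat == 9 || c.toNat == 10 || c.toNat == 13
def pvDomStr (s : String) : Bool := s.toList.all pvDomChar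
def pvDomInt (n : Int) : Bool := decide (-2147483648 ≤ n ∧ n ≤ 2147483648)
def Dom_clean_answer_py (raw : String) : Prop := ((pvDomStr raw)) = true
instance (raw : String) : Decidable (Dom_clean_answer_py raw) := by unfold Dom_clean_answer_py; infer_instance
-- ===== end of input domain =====

-- B replaces A's reverse early-exit scan by collecting all valid letters forward and taking the last (simpler decomposition).

-- ===== PORT A =====
-- 'ch in "ABCDE"' on a single character = membership in the letter list
def pvIsAnswerLetter (c : Char) : Bool := c ∈ ['A', 'B', 'C', 'D', 'E']

-- the 'for ch in reversed(raw): if ch in "ABCDE": return ch' loop, with its 'return "?"' fall-through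
def pvScanRev : List Char → String
  | [] => "?"
  | c :: cs => if pvIsAnswerLetter c then String.ofList [c] else pvScanRev cs

def clean_answer_py (raw : String) : String :=
  if raw = "" then "?"
  else pvScanRev (PySem.Str.upper (PySem.Str.strip raw)).toList.reverse

-- ===== PORT B =====
def clean_answer_py_alt (raw : String) : String :=
  if raw = "" then "?"
  else
    let valid := (PySem.Str.upper (PySem.Str.strip raw)).toList.filter pvIsAnswerLetter
    match valid.getLast? with
    | some c => String.ofList [c]
    | none => "?"

-- ===== PRECONDITION & SPEC =====
def Spec_clean_answer_py (raw : String) (out : String) : Prop := out = clean_answer_py_alt raw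
instance (raw : String) (out : String) : Decidable (Spec_clean_answer_py raw out) := by unfold Spec_clean_answer_py; infer_instance

-- ===== CLAIM (what is proved, stated in full; the proofs are below) =====
def Claim_equal_clean_answer_py : Prop := ∀ (raw : String), Dom_clean_answer_py raw → Spec_clean_answer_py raw (clean_answer_py raw)

-- ===== LEMMAS AND PROOFS =====

-- the reverse early-exit scan returns the head of the filtered list
lemma pvScanRev_eq_filter_head (l : List Char) :
    pvScanRev l = match (l.filter pvIsAnswerLetter).head? with
      | some c => String.ofList [c]
      | none => "?" := by
  induction l with
  | nil => rfl
  | cons c cs ih =>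
    by_cases h : pvIsAnswerLetter c <;> simp [pvScanRev, h, ih]

-- ===== VERDICT (by name: the statement is the Claim_ definition above) =====
theorem clean_answer_py_spec : Claim_equal_clean_answer_py := by
  intro raw _
  unfold Spec_clean_answer_py clean_answer_py clean_answer_py_alt
  by_cases h : raw = ""
  · simp [h]
  · simp only [h, ite_false]
    rw [pvScanRev_eq_filter_head, List.filter_reverse, List.head?_reverse]
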